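-- pv_equiv track=rewrite | github.com/kulraghav/leetcode_practice | practice.py | max_valid
-- ===== SOURCE A (Python) =====
-- def is_annihilating(a, stack):
--     if not stack:
--         return False
--     else:
--         if a == ")" and stack[-1] == "(":
--             return True
--         else:
--             return False
--
-- def max_valid(s):
--     stack = []
--     for i in range(len(s)):
--         if s[i] == "(":
--             stack.append(s[i])
--
--         if s[i] == ")":
--             if is_annihilating(")", stack):
--                 stack.pop(-1)
--             else:
--                 stack.append(s[i])
--
--     return len(s) - len(stack)
-- ===== SOURCE B (Python) =====
-- def max_valid(s):
--     # Fixpoint rewriting: keep only parentheses, then repeatedly delete adjacent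
--     # open-close pairs until the string is irreducible; the residue is exactly the
--     # unmatched characters, so the answer is len(s) - len(residue).
--     t = "".join(c for c in s if c in "()")
--     while True:
--         r = t.replace("()", "")
--         if r == t:
--             break
--         t = r
--     return len(s) - len(t)
-- ===== Notes on version B (the rewrite author's own statement) =====
-- stated objective: alternative
-- what changed: Replaces the per-character stack simulation (and the is_annihilating helper) with fixpoint string rewriting: filter out non-parentheses, then repeatedly delete adjacent open-close pairs via str.replace until the string is irreducible; the residue's length is the number of unmatched characters.
import Mathlib
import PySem

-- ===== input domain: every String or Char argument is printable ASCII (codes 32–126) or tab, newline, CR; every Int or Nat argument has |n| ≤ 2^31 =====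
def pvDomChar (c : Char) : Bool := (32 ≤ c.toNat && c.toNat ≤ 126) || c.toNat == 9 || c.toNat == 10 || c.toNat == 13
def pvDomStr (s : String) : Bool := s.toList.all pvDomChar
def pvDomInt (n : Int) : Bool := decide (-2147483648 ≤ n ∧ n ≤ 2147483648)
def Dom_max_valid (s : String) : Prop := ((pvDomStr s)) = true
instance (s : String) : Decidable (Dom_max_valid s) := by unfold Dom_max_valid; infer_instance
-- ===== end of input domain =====

-- B replaces A's stack simulation by fixpoint rewriting (repeatedly deleting adjacent
-- open-close pairs from the parenthesis subsequence); return value only, no observable mutation.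

-- ===== PORT A =====
-- helper kept as in A
def is_annihilating (a : Char) (stack : List Char) : Bool :=
  if stack.isEmpty then false
  else if a = ')' && stack.getLast? = some '(' then true else false

-- one iteration of A's for-loop body (two successive ifs, as in the source)
def pvStepA (stack : List Char) (c : Char) : List Char :=
  let stack := if c = '(' then stack ++ [c] else stack
  if c = ')' then
    (if is_annihilating ')' stack then stack.dropLast else stack ++ [c])
  else stack

def max_valid (s : String) : Int :=
  let stack := s.toList.foldl pvStepA []
  (PySem.Str.len s : Int) - (stack.length : Int)

-- ===== PORT B =====
-- one left-to-right pass of t.replace("()", "") (non-overlapping, as in Python)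
def reduceOnce : List Char → List Char
  | '(' :: ')' :: rest => reduceOnce rest
  | c :: rest => c :: reduceOnce rest
  | [] => []

-- reduceOnce steps through a non-"()" head
theorem reduceOnce_cons (c : Char) (rest : List Char)
    (h : ∀ rest', c = '(' → rest = ')' :: rest' → False) :
    reduceOnce (c :: rest) = c :: reduceOnce rest := by
  cases rest with
  | nil => cases c; simp [reduceOnce]
  | cons d ds =>
    by_cases hc : c = '('
    · have hd : d ≠ ')' := fun hd => h ds hc (by rw [hd])
      subst hc; rw [reduceOnce.eq_def]; simp [hd]
    · rw [reduceOnce.eq_def]; simp [hc]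

-- each replace pass either changes nothing or strictly shortens (needed for termination)
theorem reduceOnce_eq_or_lt (t : List Char) :
    reduceOnce t = t ∨ (reduceOnce t).length < t.length := by
  induction t using reduceOnce.induct with
  | case1 rest ih =>
    right
    rcases ih with h | h
    · simp [reduceOnce, h]
    · simp only [reduceOnce, List.length_cons]; omega
  | case2 c rest h1 ih =>
    rw [reduceOnce_cons c rest h1]
    rcases ih with h | h
    · left; rw [h]
    · right; simp only [List.length_cons]; omega
  | case3 => left; rfl

-- B's while-loop: delete adjacent open-close pairs until nothing changes
def reduceFix (t : List Char) : List Char :=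
  if h : reduceOnce t = t then t else reduceFix (reduceOnce t)
termination_by t.length
decreasing_by
  rcases reduceOnce_eq_or_lt t with h' | h'
  · exact absurd h' h
  · exact h'

def max_valid_alt (s : String) : Int :=
  let t := s.toList.filter (fun c => c = '(' ∨ c = ')')
  (PySem.Str.len s : Int) - ((reduceFix t).length : Int)

-- ===== PRECONDITION & SPEC =====
def Spec_max_valid (s : String) (out : Int) : Prop := out = max_valid_alt s
instance (s : String) (out : Int) : Decidable (Spec_max_valid s out) := by unfold Spec_max_valid; infer_instance

-- ===== CLAIM (what is proved, stated in full; the proofs are below) =====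
def Claim_equal_max_valid : Prop := ∀ (s : String), Dom_max_valid s → Spec_max_valid s (max_valid s)

-- ===== LEMMAS AND PROOFS =====

-- pushing '(' then seeing ')' is a no-op for A's stack machine
theorem pvStepA_cancel (st : List Char) : pvStepA (pvStepA st '(') ')' = st := by
  simp [pvStepA, is_annihilating]

-- A's fold is invariant under one reduction pass
theorem foldl_reduceOnce (t : List Char) :
    ∀ st : List Char, t.foldl pvStepA st = (reduceOnce t).foldl pvStepA st := by
  induction t using reduceOnce.induct with
  | case1 rest ih =>
    intro st
    simp only [reduceOnce, List.foldl_cons]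
    rw [pvStepA_cancel]
    exact ih st
  | case2 c rest h1 ih =>
    intro st
    rw [reduceOnce_cons c rest h1]
    simp only [List.foldl_cons]
    exact ih _
  | case3 => intro st; rfl

-- …hence invariant under the whole fixpoint loop
theorem foldl_reduceFix (t : List Char) :
    ∀ st : List Char, t.foldl pvStepA st = (reduceFix t).foldl pvStepA st := by
  induction t using reduceFix.induct with
  | case1 t h =>
    intro st; rw [reduceFix]; simp [h]
  | case2 t h ih =>
    intro st; rw [reduceFix]; simp only [h]
    rw [foldl_reduceOnce t st]
    exact ih st

-- non-parenthesis characters are no-ops for A's stack machine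
theorem foldl_filter_parens (l : List Char) :
    ∀ st : List Char,
      l.foldl pvStepA st = (l.filter (fun c => c = '(' ∨ c = ')')).foldl pvStepA st := by
  induction l with
  | nil => intro st; rfl
  | cons c rest ih =>
    intro st
    by_cases hc : c = '(' ∨ c = ')'
    · rw [List.filter_cons_of_pos (by simpa using hc)]
      simp only [List.foldl_cons]; exact ih _
    · rw [List.filter_cons_of_neg (by simpa using hc)]
      push Not at hc
      have : pvStepA st c = st := by simp [pvStepA, hc.1, hc.2]
      simp only [List.foldl_cons, this]; exact ih st

-- the fixpoint of reduceFix is a fixpoint of reduceOnce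
theorem reduceFix_fixed (t : List Char) : reduceOnce (reduceFix t) = reduceFix t := by
  induction t using reduceFix.induct with
  | case1 t h => rw [reduceFix]; simp only [h]; exact h
  | case2 t h ih => rw [reduceFix]; simp only [h]; exact ih

-- reduceOnce only keeps characters of its input
theorem reduceOnce_subset (t : List Char) : ∀ c ∈ reduceOnce t, c ∈ t := by
  induction t using reduceOnce.induct with
  | case1 rest ih =>
    intro c hc
    simp only [reduceOnce] at hc
    exact List.mem_cons_of_mem _ (List.mem_cons_of_mem _ (ih c hc))
  | case2 d rest h1 ih =>
    intro c hc
    rw [reduceOnce_cons d rest h1] at hc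
    rcases List.mem_cons.mp hc with h | h
    · exact h ▸ List.mem_cons_self
    · exact List.mem_cons_of_mem _ (ih c h)
  | case3 => intro c hc; exact hc

theorem reduceFix_subset (t : List Char) : ∀ c ∈ reduceFix t, c ∈ t := by
  induction t using reduceFix.induct with
  | case1 t h => rw [reduceFix]; simp [h]
  | case2 t h ih =>
    rw [reduceFix]; simp only [h]
    intro c hc
    exact reduceOnce_subset t c (ih c hc)

-- an irreducible all-parenthesis string is ")^a(^b"
theorem fixed_shape (t : List Char) (hp : ∀ c ∈ t, c = '(' ∨ c = ')')
    (hf : reduceOnce t = t) :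
    ∃ a b, t = List.replicate a ')' ++ List.replicate b '(' := by
  induction t with
  | nil => exact ⟨0, 0, rfl⟩
  | cons c rest ih =>
    have hprest : ∀ x ∈ rest, x = '(' ∨ x = ')' := fun x hx => hp x (List.mem_cons_of_mem _ hx)
    rcases hp c List.mem_cons_self with hc | hc
    · -- c = '(' : rest cannot start with ')', and rest is all '(' by IH
      subst hc
      cases rest with
      | nil => exact ⟨0, 1, rfl⟩
      | cons d ds =>
        by_cases hd : d = ')'
        · exfalso
          subst hd
          simp only [reduceOnce] at hf
          have := congrArg List.length hf
          have hle : (reduceOnce ds).length ≤ ds.length := by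
            rcases reduceOnce_eq_or_lt ds with h | h
            · rw [h]
            · omega
          simp at this; omega
        · have hstep : reduceOnce ('(' :: d :: ds) = '(' :: reduceOnce (d :: ds) := by
            rw [reduceOnce.eq_def]; simp [hd]
          rw [hstep] at hf
          have hf' : reduceOnce (d :: ds) = d :: ds := List.cons_injective hf
          obtain ⟨a, b, hab⟩ := ih hprest hf'
          -- head d ≠ ')' forces a = 0
          cases a with
          | succ a' =>
            exfalso; rw [List.replicate_succ] at hab
            simp at hab; exact hd hab.1
          | zero =>
            simp only [List.replicate_zero, List.nil_append] at hab
            exact ⟨0, b + 1, by rw [hab]; simp [List.replicate_succ]⟩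
    · -- c = ')'
      subst hc
      have hstep : reduceOnce (')' :: rest) = ')' :: reduceOnce rest := by
        rw [reduceOnce.eq_def]; simp
      rw [hstep] at hf
      have hf' : reduceOnce rest = rest := List.cons_injective hf
      obtain ⟨a, b, hab⟩ := ih hprest hf'
      exact ⟨a + 1, b, by rw [hab]; simp [List.replicate_succ]⟩

-- A's machine leaves ")^a" stacks alone when fed ')'s, and appends '('s
theorem foldl_closes (a : Nat) : ∀ k : Nat,
    (List.replicate a ')').foldl pvStepA (List.replicate k ')') = List.replicate (k + a) ')' := by
  induction a with
  | zero => intro k; simp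
  | succ a' ih =>
    intro k
    rw [List.replicate_succ, List.foldl_cons]
    have hstep : pvStepA (List.replicate k ')') ')' = List.replicate (k + 1) ')' := by
      cases k with
      | zero => simp [pvStepA, is_annihilating, List.replicate_succ]
      | succ k' =>
        simp [pvStepA, is_annihilating, List.getLast?_replicate, List.replicate_succ']
    rw [hstep, ih (k + 1)]
    congr 1; omega

theorem foldl_opens (b : Nat) : ∀ st : List Char,
    (List.replicate b '(').foldl pvStepA st = st ++ List.replicate b '(' := by
  induction b with
  | zero => intro st; simp
  | succ b' ih =>
    intro st
    rw [List.replicate_succ, List.foldl_cons]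
    have hstep : pvStepA st '(' = st ++ ['('] := by simp [pvStepA]
    rw [hstep, ih]
    simp [List.replicate_succ']

-- running A's machine on an irreducible residue reproduces the residue
theorem foldl_fixed (t : List Char) (hp : ∀ c ∈ t, c = '(' ∨ c = ')')
    (hf : reduceOnce t = t) : t.foldl pvStepA [] = t := by
  obtain ⟨a, b, hab⟩ := fixed_shape t hp hf
  subst hab
  rw [List.foldl_append]
  have h0 : List.foldl pvStepA [] (List.replicate a ')') = List.replicate a ')' := by
    simpa using foldl_closes a 0
  rw [h0, foldl_opens b]

-- ===== VERDICT (by name: the statement is the Claim_ definition above) =====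
theorem max_valid_spec : Claim_equal_max_valid := by
  intro s _
  unfold Spec_max_valid max_valid max_valid_alt
  simp only []
  set t := s.toList.filter (fun c => c = '(' ∨ c = ')') with ht
  have h1 : s.toList.foldl pvStepA [] = (reduceFix t).foldl pvStepA [] := by
    rw [foldl_filter_parens s.toList [], ← ht, foldl_reduceFix t []]
  have hp : ∀ c ∈ reduceFix t, c = '(' ∨ c = ')' := by
    intro c hc
    have := reduceFix_subset t c hc
    rw [ht] at this
    simpa using (List.mem_filter.mp this).2
  have h2 : (reduceFix t).foldl pvStepA [] = reduceFix t :=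
    foldl_fixed _ hp (reduceFix_fixed t)
  rw [h1, h2]
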